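-- pv_equiv track=rewrite | github.com/Eandreas1857/dsgrn_acdc | src/funforMGpaths.py | listpath
-- ===== SOURCE A (Python) =====
-- def listpath(startlist):
--     '''
--     This function finds paths in the parameter graph between PGI
--     (parameter graph indices [listed in the input argument]
--     such that the PGI do not repeat.
--     Important: The assumption that the PGI do not repeat means that during the course of the network behavior,
--     the system never returns to the same parameterization, even if it would be appropriate to match.
--
--     :param X: a list of lists, but only evaluates first two sublists, of parameter graph indices
--     :return: a list of lists of parameter graph indices that represent paths through the parameter graph between the last
--     element in the first list and the first element in the second list as long as
--     all of the other elements in the second list are not in the first list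
--     '''
--     endlist = []
--     for i in startlist[1]:
--         for j in startlist[0]:
--             n = len(j)
--             if j[n-1] == i[0]:
--                 if len(set(i[1:]).intersection(set(j))) == 0:
--                     E = [j.copy(),i.copy()]
--                     E[0].pop()
--                     final = []
--                     for p in E:
--                         for q in p:
--                             final.append(q)
--                     endlist.append(final.copy())
--     return endlist
-- ===== SOURCE B (Python) =====
-- def listpath(startlist):
--     buckets = {}
--     for j in startlist[0]:
--         buckets.setdefault(j[-1], []).append(j)
--     endlist = []
--     for i in startlist[1]:
--         bad = set(i[1:])
--         for j in buckets.get(i[0], []):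
--             if bad.isdisjoint(j):
--                 endlist.append(j[:-1] + i)
--     return endlist
-- ===== Notes on version B (the rewrite author's own statement) =====
-- stated objective: alternative
-- what changed: B replaces the nested scan of startlist[0] for every element of startlist[1] by a dict that buckets startlist[0] by last element once, then looks each i[0] up directly.
-- outside the precondition, e.g. on listpath([[[]], []]): A returns [], B raises IndexError; on listpath([[], [[]]]): A returns [], B raises IndexError
import Mathlib
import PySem

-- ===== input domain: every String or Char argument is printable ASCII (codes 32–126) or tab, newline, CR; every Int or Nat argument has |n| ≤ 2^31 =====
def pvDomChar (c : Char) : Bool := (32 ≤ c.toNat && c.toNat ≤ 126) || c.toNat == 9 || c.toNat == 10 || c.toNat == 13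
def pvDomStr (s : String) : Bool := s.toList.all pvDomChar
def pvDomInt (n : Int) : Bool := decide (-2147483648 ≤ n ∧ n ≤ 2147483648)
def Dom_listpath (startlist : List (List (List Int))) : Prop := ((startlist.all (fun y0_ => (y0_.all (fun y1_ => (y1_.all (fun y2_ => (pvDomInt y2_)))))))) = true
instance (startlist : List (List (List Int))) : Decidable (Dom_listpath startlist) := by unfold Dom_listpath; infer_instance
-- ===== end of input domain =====

-- B replaces A's rescan of startlist[0] for every element of startlist[1] by a dict bucketing
-- startlist[0] once by last element; equivalence of the return values is proved on Pre_.

-- ===== PORT A =====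
def listpath (startlist : List (List (List Int))) : List (List Int) :=
  -- endlist = []; for i in startlist[1]: for j in startlist[0]: ...
  (PySem.List.pyGetD startlist 1 []).foldl (fun endlist i =>
    (PySem.List.pyGetD startlist 0 []).foldl (fun endlist j =>
      let n : Int := PySem.List.len j
      -- j[n-1] == i[0]  (indices in range under Pre_)
      if PySem.List.pyGetD j (n - 1) 0 == PySem.List.pyGetD i 0 0 then
        -- len(set(i[1:]).intersection(set(j))) == 0
        if PySem.Set.len (PySem.Set.inter (PySem.Set.ofList (PySem.List.slice i (some 1)))
             (PySem.Set.ofList j)) == 0 then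
          -- E = [j.copy(), i.copy()]; E[0].pop()  (pop of the last element; j ≠ [] under Pre_)
          let E : List (List Int) := [j.dropLast, i]
          -- final = []; for p in E: for q in p: final.append(q)
          let final := E.foldl (fun final p => p.foldl (fun final q => final ++ [q]) final) []
          endlist ++ [final]
        else endlist
      else endlist) endlist) []

-- ===== PORT B =====
def listpath_alt (startlist : List (List (List Int))) : List (List Int) :=
  -- buckets = {}; for j in startlist[0]: buckets.setdefault(j[-1], []).append(j)
  let buckets : PySem.Dict Int (List (List Int)) :=
    (PySem.List.pyGetD startlist 0 []).foldl
      (fun d j => d.modify (PySem.List.pyGetD j (-1) 0) [] (fun v => v ++ [j])) PySem.Dict.empty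
  -- for i in startlist[1]: bad = set(i[1:]); for j in buckets.get(i[0], []): ...
  (PySem.List.pyGetD startlist 1 []).foldl (fun endlist i =>
    let bad : PySem.Set Int := PySem.Set.ofList (PySem.List.slice i (some 1))
    (buckets.getD (PySem.List.pyGetD i 0 0) []).foldl (fun endlist j =>
      if PySem.Set.isdisjoint bad j then
        endlist ++ [PySem.List.slice j none (some (-1)) ++ i]  -- j[:-1] + i
      else endlist) endlist) []

-- ===== PRECONDITION & SPEC =====
-- Pre_ excludes the inputs on which one of the two programs raises IndexError: fewer than two
-- sublists (both raise), or an empty path inside startlist[0] or startlist[1] (j[-1]/j[n-1]/i[0];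
-- A still returns an empty result on a few such degenerate corners that its loops never reach,
-- e.g. when the other of the first two sublists is empty, but B naturally raises there).
def Pre_listpath (startlist : List (List (List Int))) : Prop :=
  2 ≤ startlist.length ∧
  (∀ j ∈ PySem.List.pyGetD startlist 0 [], j ≠ []) ∧
  (∀ i ∈ PySem.List.pyGetD startlist 1 [], i ≠ [])
instance (startlist : List (List (List Int))) : Decidable (Pre_listpath startlist) := by
  unfold Pre_listpath; infer_instance
def pvWitness_listpath : List (List (List Int)) := [[[1, 2], [3, 2], [2]], [[2, 5], [9]], [[7]]]
def Spec_listpath (startlist : List (List (List Int))) (out : List (List Int)) : Prop := out = listpath_alt startlist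
instance (startlist : List (List (List Int))) (out : List (List Int)) : Decidable (Spec_listpath startlist out) := by unfold Spec_listpath; infer_instance

-- ===== CLAIM (what is proved, stated in full; the proofs are below) =====
def Claim_equal_listpath : Prop := ∀ (startlist : List (List (List Int))), Dom_listpath startlist → Pre_listpath startlist → Spec_listpath startlist (listpath startlist)

-- ===== LEMMAS AND PROOFS =====

-- j[len(j)-1] and j[-1] are the same element (the default when j = []).
theorem pyGetD_len_sub_one (j : List Int) :
    PySem.List.pyGetD j (PySem.List.len j - 1) 0 = PySem.List.pyGetD j (-1) 0 := by
  cases j with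
  | nil => rfl
  | cons a t =>
    simp [PySem.List.pyGetD, PySem.List.pyGet?, PySem.List.pyIdx?, PySem.List.len]

-- j[:-1] is dropLast.
theorem slice_neg_one_dropLast (j : List Int) :
    PySem.List.slice j none (some (-1)) = j.dropLast := by
  cases j with
  | nil => rfl
  | cons a t =>
    simp [PySem.List.slice, PySem.List.clampIdx, List.dropLast_eq_take]
    split_ifs <;> [omega; (congr 1; omega)]

-- "len(set(t) & set(j)) == 0" is "set(t).isdisjoint(j)".
theorem inter_len_eq_isdisjoint (t j : List Int) :
    (PySem.Set.len (PySem.Set.inter (PySem.Set.ofList t) (PySem.Set.ofList j)) == 0)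
      = PySem.Set.isdisjoint (PySem.Set.ofList t) j := by
  simp only [PySem.Set.len, PySem.Set.inter, PySem.Set.isdisjoint]
  rw [Bool.eq_iff_iff]
  simp [List.filter_eq_nil_iff, List.length_eq_zero_iff, List.any_eq_false, PySem.Set.mem_ofList]

-- the bucket of key c holds exactly the j with j[-1] == c, in order
theorem bucket_spec (s0 : List (List Int)) (c : Int) :
    ((s0.foldl (fun d j => d.modify (PySem.List.pyGetD j (-1) 0) [] (fun v => v ++ [j]))
        PySem.Dict.empty).getD c [])
      = s0.filter (fun j => PySem.List.pyGetD j (-1) 0 == c) := by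
  have h := PySem.Dict.getD_foldl_modify_append
      (s0.map (fun j => (PySem.List.pyGetD j (-1) 0, j))) (PySem.Dict.empty) c
  rw [List.foldl_map] at h
  simp only [h, PySem.Dict.getD_empty, List.nil_append, List.filter_map, List.map_map]
  simp [Function.comp_def]

-- for one i, A's inner scan of s0 equals B's scan of the bucket of i[0]
theorem inner_eq (s0 : List (List Int)) (i : List Int) (acc : List (List Int)) :
    s0.foldl (fun endlist j =>
      let n : Int := PySem.List.len j
      if PySem.List.pyGetD j (n - 1) 0 == PySem.List.pyGetD i 0 0 then
        if PySem.Set.len (PySem.Set.inter (PySem.Set.ofList (PySem.List.slice i (some 1)))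
             (PySem.Set.ofList j)) == 0 then
          let E : List (List Int) := [j.dropLast, i]
          let final := E.foldl (fun final p => p.foldl (fun final q => final ++ [q]) final) []
          endlist ++ [final]
        else endlist
      else endlist) acc
    = ((s0.foldl (fun d j => d.modify (PySem.List.pyGetD j (-1) 0) [] (fun v => v ++ [j]))
          PySem.Dict.empty).getD (PySem.List.pyGetD i 0 0) []).foldl (fun endlist j =>
        if PySem.Set.isdisjoint (PySem.Set.ofList (PySem.List.slice i (some 1))) j then
          endlist ++ [PySem.List.slice j none (some (-1)) ++ i]
        else endlist) acc := by
  have hA : ∀ (e : List (List Int)) (j : List Int),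
      (let n : Int := PySem.List.len j;
       if PySem.List.pyGetD j (n - 1) 0 == PySem.List.pyGetD i 0 0 then
        if PySem.Set.len (PySem.Set.inter (PySem.Set.ofList (PySem.List.slice i (some 1)))
             (PySem.Set.ofList j)) == 0 then
          let E : List (List Int) := [j.dropLast, i]
          let final := E.foldl (fun final p => p.foldl (fun final q => final ++ [q]) final) []
          e ++ [final]
        else e
       else e)
      = if ((PySem.List.pyGetD j (-1) 0 == PySem.List.pyGetD i 0 0) &&
            PySem.Set.isdisjoint (PySem.Set.ofList (PySem.List.slice i (some 1))) j) then
          e ++ [j.dropLast ++ i] else e := by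
    intro e j
    simp only [pyGetD_len_sub_one, inter_len_eq_isdisjoint, List.foldl_cons, List.foldl_nil,
      PySem.List.foldl_append_singleton, List.nil_append, Bool.and_eq_true]
    split_ifs <;> simp_all
  simp only [hA]
  rw [PySem.List.foldl_append_if
        (fun j => (PySem.List.pyGetD j (-1) 0 == PySem.List.pyGetD i 0 0) &&
            PySem.Set.isdisjoint (PySem.Set.ofList (PySem.List.slice i (some 1))) j)
        (fun j => j.dropLast ++ i) s0 acc,
      PySem.List.foldl_append_if
        (fun j => PySem.Set.isdisjoint (PySem.Set.ofList (PySem.List.slice i (some 1))) j)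
        (fun j => PySem.List.slice j none (some (-1)) ++ i) _ acc,
      bucket_spec, List.filter_filter]
  simp only [slice_neg_one_dropLast, Bool.and_comm]

-- ===== VERDICT (by name: the statement is the Claim_ definition above) =====
theorem listpath_spec : Claim_equal_listpath := by
  intro startlist _hdom _hpre
  unfold Spec_listpath listpath listpath_alt
  simp only [inner_eq]
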